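-- pv_equiv track=rewrite | github.com/widehyo1/playground | 2025/07/14/kakaoid.py | solution
-- ===== SOURCE A (Python) =====
-- from itertools import groupby
--
-- def solution(new_id):
--     vaild_special = {"-", "_", "."}
--     new_id = new_id.lower()
--     new_id = ''.join(char for char in new_id if char.isalnum() or char in vaild_special)
--     new_id = ''.join(gen_group_dot(new_id))
--     if new_id == ".":
--         new_id = ""
--     if len(new_id):
--         if new_id[0] == ".":
--             new_id = new_id[1:]
--         if new_id[-1] == ".":
--             new_id = new_id[:-1]
--     if not new_id:
--         new_id = "a"
--
--     if len(new_id) > 15: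
--         new_id = new_id[:15]
--         if new_id[-1] == ".":
--             new_id = new_id[:-1]
--     if len(new_id) == 2:
--         new_id = new_id + new_id[-1]
--     if len(new_id) == 1:
--         new_id = new_id * 3
--     return new_id
--
-- def gen_group_dot(new_id):
--     for groupper, iterator in groupby(new_id):
--         if groupper == ".":
--             yield "."
--             continue
--         yield from iterator
-- ===== SOURCE B (Python) =====
-- def solution(new_id):
--     filtered = ''.join(c for c in new_id.lower() if c.isalnum() or c in "-_.")
--     parts, cur = [], []
--     for c in filtered:
--         if c == '.':
--             if cur:
--                 parts.append(''.join(cur))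
--                 cur = []
--         else:
--             cur.append(c)
--     if cur:
--         parts.append(''.join(cur))
--     s = '.'.join(parts) or "a"
--     if len(s) > 15:
--         s = s[:15]
--         if s.endswith('.'):
--             s = s[:-1]
--     if len(s) == 2:
--         s = s + s[-1:]
--     elif len(s) == 1:
--         s = s * 3
--     return s
-- ===== Notes on version B (the rewrite author's own statement) =====
-- stated objective: alternative
-- what changed: A collapses dot runs with an itertools.groupby generator, special-cases the lone-dot result, and trims one leading and one trailing dot by slicing; B instead makes one left-to-right pass that accumulates the dot-free segments and joins them with a dot separator, which subsumes the collapsing, trimming and the special case; the length/padding/truncation rules are unchanged.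
import Mathlib
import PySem

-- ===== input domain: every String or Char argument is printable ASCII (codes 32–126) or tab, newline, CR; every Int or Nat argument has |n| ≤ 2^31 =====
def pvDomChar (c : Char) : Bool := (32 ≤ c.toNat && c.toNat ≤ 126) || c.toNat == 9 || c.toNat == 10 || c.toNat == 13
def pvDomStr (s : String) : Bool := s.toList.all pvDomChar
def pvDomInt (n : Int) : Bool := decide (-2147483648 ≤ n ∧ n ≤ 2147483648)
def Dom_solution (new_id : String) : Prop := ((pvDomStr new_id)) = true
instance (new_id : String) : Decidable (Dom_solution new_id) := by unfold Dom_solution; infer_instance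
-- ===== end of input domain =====

-- B replaces A's groupby-based collapse of dot runs plus the one-leading/one-trailing-dot trims by a
-- single left-to-right pass that accumulates the dot-free segments and joins them with '.'; the
-- length/padding/truncation rules are unchanged. Objective: alternative (same cost, different algorithm).

-- ===== PORT A =====
-- hand port of the generator gen_group_dot: itertools.groupby peels maximal runs of equal
-- characters; a run of '.' yields a single '.', any other run is yielded whole (exact).
def genGroupDot : List Char → List Char
  | [] => []
  | c :: rest =>
    (if c == '.' then ['.'] else c :: rest.takeWhile (· == c)) ++
      genGroupDot (rest.dropWhile (· == c))
termination_by l => l.length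
decreasing_by
  simp only [List.length_cons]
  exact Nat.lt_succ_of_le (List.length_dropWhile_le _ _)

def solution (new_id : String) : String :=
  let s1 := PySem.Chars.lower new_id.toList
  let s2 := s1.filter (fun c => PySem.Chars.isalnum c || (PySem.Set.ofList ['-', '_', '.']).contains c)
  let s3 := genGroupDot s2
  let s4 := if s3 = ['.'] then [] else s3
  let s5 := if s4.length ≠ 0 then
      let t := if PySem.List.pyGet? s4 0 = some '.' then PySem.List.slice s4 (some 1) none else s4
      if PySem.List.pyGet? t (-1) = some '.' then PySem.List.slice t none (some (-1)) else t
    else s4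
  let s6 := if s5 = [] then ['a'] else s5
  let s7 := if 15 < s6.length then
      let t := PySem.List.slice s6 none (some 15)
      if PySem.List.pyGet? t (-1) = some '.' then PySem.List.slice t none (some (-1)) else t
    else s6
  -- new_id[-1] is guarded by len == 2, so the none branch of elim is unreachable (totality guard)
  let s8 := if s7.length = 2 then s7 ++ (PySem.List.pyGet? s7 (-1)).elim [] (fun c => [c]) else s7
  let s9 := if s8.length = 1 then s8 ++ s8 ++ s8 else s8
  String.ofList s9

-- ===== PORT B =====
def solution_alt (new_id : String) : String :=
  -- 'c in "-_."' in Source B is a one-character substring test, i.e. character membership (exact)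
  let filtered := (PySem.Chars.lower new_id.toList).filter
      (fun c => PySem.Chars.isalnum c || "-_.".toList.contains c)
  let st := filtered.foldl
      (fun (pc : List (List Char) × List Char) c =>
        if c = '.' then (if pc.2 = [] then pc else (pc.1 ++ [pc.2], []))
        else (pc.1, pc.2 ++ [c]))
      ([], [])
  let parts := if st.2 = [] then st.1 else st.1 ++ [st.2]
  let s := PySem.Chars.join ['.'] parts
  let s1 := if s = [] then ['a'] else s
  let s2 := if 15 < s1.length then
      let t := PySem.List.slice s1 none (some 15)
      if PySem.Chars.endswith t ['.'] then PySem.List.slice t none (some (-1)) else t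
    else s1
  let s3 := if s2.length = 2 then s2 ++ PySem.List.slice s2 (some (-1)) none
    else if s2.length = 1 then s2 ++ s2 ++ s2 else s2
  String.ofList s3

-- ===== PRECONDITION & SPEC =====
def Spec_solution (new_id : String) (out : String) : Prop := out = solution_alt new_id
instance (new_id : String) (out : String) : Decidable (Spec_solution new_id out) := by unfold Spec_solution; infer_instance

-- ===== CLAIM (what is proved, stated in full; the proofs are below) =====
def Claim_equal_solution : Prop := ∀ (new_id : String), Dom_solution new_id → Spec_solution new_id (solution new_id)

-- ===== LEMMAS AND PROOFS =====

-- proof-side view of B's accumulating pass: the dot-free segments of the input, with pending buffer cur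
def segsW : List Char → List Char → List (List Char)
  | cur, [] => if cur = [] then [] else [cur]
  | cur, c :: t =>
    if c = '.' then (if cur = [] then segsW [] t else cur :: segsW [] t)
    else segsW (cur ++ [c]) t

-- proof-side view of A's genGroupDot: collapse each run of dots to a single dot, two chars at a time
def collapse : List Char → List Char
  | [] => []
  | [c] => [c]
  | c :: d :: t => if c = '.' ∧ d = '.' then collapse (d :: t) else c :: collapse (d :: t)

theorem fold_segsW (l : List Char) (acc : List (List Char)) (cur : List Char) :
    (let st := l.foldl
      (fun (pc : List (List Char) × List Char) c =>
        if c = '.' then (if pc.2 = [] then pc else (pc.1 ++ [pc.2], []))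
        else (pc.1, pc.2 ++ [c])) (acc, cur);
     if st.2 = [] then st.1 else st.1 ++ [st.2]) = acc ++ segsW cur l := by
  induction l generalizing acc cur with
  | nil => by_cases h : cur = [] <;> simp [segsW, h]
  | cons c t ih =>
    by_cases hc : c = '.'
    · by_cases h : cur = [] <;> simp [segsW, hc, h, List.foldl_cons, ih]
    · simp [segsW, hc, List.foldl_cons, ih]

theorem collapse_cons_nondot (c : Char) (t : List Char) (h : c ≠ '.') :
    collapse (c :: t) = c :: collapse t := by
  cases t with
  | nil => simp [collapse]
  | cons d t => simp [collapse, h]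

theorem collapse_nondot_append (u t : List Char) (h : ∀ x ∈ u, x ≠ '.') :
    collapse (u ++ t) = u ++ collapse t := by
  induction u with
  | nil => simp
  | cons c u ih =>
    have hc : c ≠ '.' := h c (by simp)
    simp only [List.cons_append, collapse_cons_nondot c _ hc, ih (fun x hx => h x (by simp [hx]))]

theorem collapse_dot_drop (t : List Char) :
    collapse ('.' :: t) = '.' :: collapse (t.dropWhile (· == '.')) := by
  induction t with
  | nil => simp [collapse]
  | cons d t ih =>
    by_cases hd : d = '.'
    · subst hd; simpa [collapse] using ih
    · simp [collapse, hd, collapse_cons_nondot d t hd]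

theorem genGroupDot_eq_collapse (l : List Char) : genGroupDot l = collapse l := by
  induction l using genGroupDot.induct with
  | case1 => simp [genGroupDot, collapse]
  | case2 c rest ih =>
    by_cases hc : c = '.'
    · subst hc
      rw [genGroupDot, collapse_dot_drop, ih]
      simp
    · rw [genGroupDot, if_neg (by simpa using hc)]
      have hall : ∀ x ∈ c :: rest.takeWhile (· == c), x ≠ '.' := by
        intro x hx
        rcases List.mem_cons.1 hx with rfl | hx'
        · exact hc
        · have := List.mem_takeWhile_imp hx'
          simpa using (by simpa using this : x = c) ▸ hc
      calc (c :: rest.takeWhile (· == c)) ++ genGroupDot (rest.dropWhile (· == c))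
          = (c :: rest.takeWhile (· == c)) ++ collapse (rest.dropWhile (· == c)) := by rw [ih]
        _ = collapse ((c :: rest.takeWhile (· == c)) ++ rest.dropWhile (· == c)) := by
            rw [collapse_nondot_append _ _ hall]
        _ = collapse (c :: rest) := by rw [List.cons_append, List.takeWhile_append_dropWhile]

theorem segsW_ne_nil (t cur : List Char) (h : cur ≠ []) : segsW cur t ≠ [] := by
  induction t generalizing cur with
  | nil => simp [segsW, h]
  | cons c t ih =>
    by_cases hc : c = '.'
    · simp [segsW, hc, h]
    · simpa [segsW, hc] using ih (cur ++ [c]) (by simp)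

theorem segsW_nil_iff (t : List Char) : segsW [] t = [] ↔ ∀ x ∈ t, x = '.' := by
  induction t with
  | nil => simp [segsW]
  | cons c t ih =>
    by_cases hc : c = '.'
    · simpa [segsW, hc] using ih
    · simp [segsW, hc, segsW_ne_nil t [c] (by simp)]

theorem mem_segsW (t : List Char) : ∀ (cur s : List Char), '.' ∉ cur → s ∈ segsW cur t → s ≠ [] ∧ '.' ∉ s := by
  induction t with
  | nil =>
    intro cur s hcd hs
    by_cases h : cur = [] <;> simp [segsW, h] at hs
    subst hs; exact ⟨h, hcd⟩
  | cons c t ih =>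
    intro cur s hcd hs
    by_cases hc : c = '.'
    · by_cases h : cur = []
      · exact ih [] s (by simp) (by simpa [segsW, hc, h] using hs)
      · rcases (by simpa [segsW, hc, h] using hs : s = cur ∨ s ∈ segsW [] t) with rfl | hs'
        · exact ⟨h, hcd⟩
        · exact ih [] s (by simp) hs'
    · exact ih (cur ++ [c]) s (by simp [hcd, Ne.symm hc]) (by simpa [segsW, hc] using hs)

theorem joinDot_nil : PySem.Chars.join ['.'] [] = [] := by
  simp [PySem.Chars.join, List.intercalate]

theorem joinDot_cons (p : List Char) (ps : List (List Char)) :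
    PySem.Chars.join ['.'] (p :: ps) =
      p ++ (if ps = [] then [] else '.' :: PySem.Chars.join ['.'] ps) := by
  cases ps with
  | nil => simp [PySem.Chars.join, List.intercalate]
  | cons q qs => simp [PySem.Chars.join, List.intercalate, List.intersperse]

theorem join_segsW (t : List Char) : ∀ cur : List Char, cur ≠ [] →
    PySem.Chars.join ['.'] (segsW cur t) =
      cur ++ (if t.head? = some '.' ∧ segsW [] t ≠ [] then ['.'] else []) ++
        PySem.Chars.join ['.'] (segsW [] t) := by
  induction t with
  | nil => intro cur h; simp [segsW, h, PySem.Chars.join, List.intercalate]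
  | cons c t ih =>
    intro cur h
    by_cases hc : c = '.'
    · by_cases ht : segsW [] t = []
      · simp [segsW, hc, h, ht, PySem.Chars.join, List.intercalate]
      · simp [segsW, hc, h, ht, joinDot_cons]
    · simp only [segsW, if_neg hc, List.nil_append]
      rw [ih (cur ++ [c]) (by simp), ih [c] (by simp)]
      simp [hc]

theorem segsW_nil_cons_dot (t : List Char) : segsW [] ('.' :: t) = segsW [] t := by
  simp [segsW]

theorem segsW_nil_cons (c : Char) (t : List Char) (hc : c ≠ '.') :
    segsW [] (c :: t) = segsW [c] t := by
  simp [segsW, hc]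

-- A's collapsed string is exactly: optional leading dot, the '.'-joined segments, optional trailing dot
theorem collapse_char (f : List Char) :
    collapse f =
      (if f.head? = some '.' then ['.'] else []) ++
        PySem.Chars.join ['.'] (segsW [] f) ++
        (if f.getLast? = some '.' ∧ segsW [] f ≠ [] then ['.'] else []) := by
  induction f using collapse.induct with
  | case1 => simp [collapse, segsW]
  | case2 c =>
    by_cases hc : c = '.'
    · subst hc; simp [collapse, segsW]
    · simp [collapse, segsW, hc]
  | case3 c d t hcd ih =>
    obtain ⟨rfl, rfl⟩ : c = '.' ∧ d = '.' := hcd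
    rw [collapse, if_pos ⟨rfl, rfl⟩, ih]
    simp [segsW_nil_cons_dot, List.getLast?_cons_cons]
  | case4 c d t hcd ih =>
    rw [collapse, if_neg hcd, ih]
    have hgl : List.getLast? (c :: d :: t) = List.getLast? (d :: t) := List.getLast?_cons_cons ..
    by_cases hc : c = '.'
    · subst hc
      have hd : d ≠ '.' := fun h => hcd ⟨rfl, h⟩
      rw [segsW_nil_cons_dot, hgl]
      simp [hd]
    · rw [segsW_nil_cons c _ hc, join_segsW (d :: t) [c] (by simp), hgl]
      have hne : segsW [c] (d :: t) ≠ [] := segsW_ne_nil _ _ (by simp)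
      by_cases hseg : segsW [] (d :: t) = []
      · have hall : ∀ x ∈ d :: t, x = '.' := (segsW_nil_iff _).1 hseg
        have hd : d = '.' := hall d (by simp)
        subst hd
        have hlast : List.getLast? ('.' :: t) = some '.' := by
          rw [List.getLast?_eq_some_getLast (by simp), hall _ (List.getLast_mem (by simp))]
        simp [hseg, hlast, hne, hc]
      · simp only [List.head?_cons, hseg, ne_eq, not_false_eq_true, and_true, hne]
        simp [hc]

theorem pyGet?_zero_head (l : List Char) : PySem.List.pyGet? l 0 = l.head? := by
  cases l <;> simp [PySem.List.pyGet?, PySem.List.pyIdx?]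

theorem endswith_dot_iff (t : List Char) :
    (PySem.Chars.endswith t ['.'] = true) ↔ t.getLast? = some '.' := by
  induction t using List.reverseRecOn with
  | nil => simp [PySem.Chars.endswith]
  | append_singleton l a ih =>
    simp [PySem.Chars.endswith, List.isSuffixOf]
    exact eq_comm

-- head?, getLast? and non-emptiness of the '.'-joined segment list
theorem join_edges (parts : List (List Char)) (hps : parts ≠ [])
    (hmem : ∀ s ∈ parts, s ≠ [] ∧ '.' ∉ s) :
    PySem.Chars.join ['.'] parts ≠ [] ∧
      (PySem.Chars.join ['.'] parts).head? ≠ some '.' ∧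
      (PySem.Chars.join ['.'] parts).getLast? ≠ some '.' := by
  induction parts with
  | nil => exact absurd rfl hps
  | cons p ps ih =>
    obtain ⟨hp, hpd⟩ := hmem p (by simp)
    have hph : p.head? ≠ some '.' := fun h => hpd (List.mem_of_mem_head? h)
    have hpl : p.getLast? ≠ some '.' := fun h => hpd (List.mem_of_getLast? h)
    rw [joinDot_cons]
    cases ps with
    | nil => simpa using ⟨hp, hph, hpl⟩
    | cons q qs =>
      obtain ⟨hj, hjh, hjl⟩ := ih (by simp) (fun s hs => hmem s (by simp [hs]))
      refine ⟨by simp, ?_, ?_⟩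
      · rw [if_neg (by simp), List.head?_append_of_ne_nil _ hp]
        exact hph
      · rw [if_neg (by simp), List.getLast?_append_of_ne_nil _ (by simp)]
        have : ('.' :: PySem.Chars.join ['.'] (q :: qs)).getLast? =
            (PySem.Chars.join ['.'] (q :: qs)).getLast? := by
          have h2 : ((['.'] ++ PySem.Chars.join ['.'] (q :: qs)).getLast?) =
              (PySem.Chars.join ['.'] (q :: qs)).getLast? :=
            List.getLast?_append_of_ne_nil ['.'] hj
          simpa using h2
        rw [this]
        exact hjl

-- A's collapse + "."-special-case + one-dot trims compute exactly the '.'-joined segment list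
theorem trimA_eq_join (f : List Char) :
    (let s3 := genGroupDot f
     let s4 := if s3 = ['.'] then [] else s3
     if s4.length ≠ 0 then
       let t := if PySem.List.pyGet? s4 0 = some '.' then PySem.List.slice s4 (some 1) none else s4
       if PySem.List.pyGet? t (-1) = some '.' then PySem.List.slice t none (some (-1)) else t
     else s4) = PySem.Chars.join ['.'] (segsW [] f) := by
  rw [genGroupDot_eq_collapse, collapse_char f]
  by_cases hP : segsW [] f = []
  · rw [hP, joinDot_nil]
    by_cases hh : f.head? = some '.'
    · rw [if_pos hh]
      simp
    · rw [if_neg hh]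
      simp
  · obtain ⟨hj, hjh, hjl⟩ := join_edges (segsW [] f) hP (fun s hs => mem_segsW f [] s (by simp) hs)
    generalize hJ : PySem.Chars.join ['.'] (segsW [] f) = J at hj hjh hjl ⊢
    simp only [hP, ne_eq, not_false_eq_true, and_true]
    by_cases hh : f.head? = some '.' <;> by_cases hl : f.getLast? = some '.'
    · -- pre = ['.'], post = ['.']
      rw [if_pos hh, if_pos hl]
      have e1 : ((['.'] ++ J ++ ['.']) : List Char) = '.' :: (J ++ ['.']) := by simp
      have h1 : ('.' :: (J ++ ['.']) : List Char) ≠ ['.'] := by simp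
      have h2 : ('.' :: (J ++ ['.']) : List Char).length ≠ 0 := by simp
      rw [e1, if_neg h1, if_pos h2, pyGet?_zero_head, List.head?_cons, if_pos rfl,
        PySem.List.slice_from_one, List.tail_cons, PySem.List.pyGet?_neg_one,
        List.getLast?_append_of_ne_nil J (by simp),
        if_pos (show (['.'] : List Char).getLast? = some '.' from rfl),
        PySem.List.slice_to_neg_one, List.dropLast_concat]
    · -- pre = ['.'], post = []
      rw [if_pos hh, if_neg hl]
      have e1 : ((['.'] ++ J ++ []) : List Char) = '.' :: J := by simp
      have h1 : ('.' :: J : List Char) ≠ ['.'] := by simp [hj]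
      have h2 : ('.' :: J : List Char).length ≠ 0 := by simp
      rw [e1, if_neg h1, if_pos h2, pyGet?_zero_head, List.head?_cons, if_pos rfl,
        PySem.List.slice_from_one, List.tail_cons, PySem.List.pyGet?_neg_one, if_neg hjl]
    · -- pre = [], post = ['.']
      rw [if_neg hh, if_pos hl]
      have e1 : (([] ++ J ++ ['.']) : List Char) = J ++ ['.'] := by simp
      have h1 : (J ++ ['.'] : List Char) ≠ ['.'] := by
        intro h
        have := congrArg List.length h
        simp at this
        exact hj this
      have h2 : (J ++ ['.'] : List Char).length ≠ 0 := by simp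
      have h3 : PySem.List.pyGet? (J ++ ['.']) 0 ≠ some '.' := by
        rw [pyGet?_zero_head, List.head?_append_of_ne_nil _ hj]
        exact hjh
      rw [e1, if_neg h1, if_pos h2, if_neg h3, PySem.List.pyGet?_neg_one,
        List.getLast?_append_of_ne_nil J (by simp),
        if_pos (show (['.'] : List Char).getLast? = some '.' from rfl),
        PySem.List.slice_to_neg_one, List.dropLast_concat]
    · -- pre = [], post = []
      rw [if_neg hh, if_neg hl]
      have e1 : (([] ++ J ++ []) : List Char) = J := by simp
      have h1 : J ≠ ['.'] := fun h => hjh (by rw [h]; rfl)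
      have h2 : J.length ≠ 0 := by simpa [List.length_eq_zero_iff] using hj
      have h3 : PySem.List.pyGet? J 0 ≠ some '.' := by rw [pyGet?_zero_head]; exact hjh
      rw [e1, if_neg h1, if_pos h2, if_neg h3, PySem.List.pyGet?_neg_one, if_neg hjl]

theorem tail_eq (s : List Char) :
    (let s6 := if s = [] then ['a'] else s
     let s7 := if 15 < s6.length then
         let t := PySem.List.slice s6 none (some 15)
         if PySem.List.pyGet? t (-1) = some '.' then PySem.List.slice t none (some (-1)) else t
       else s6
     let s8 := if s7.length = 2 then s7 ++ (PySem.List.pyGet? s7 (-1)).elim [] (fun c => [c]) else s7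
     if s8.length = 1 then s8 ++ s8 ++ s8 else s8) =
    (let s1 := if s = [] then ['a'] else s
     let s2 := if 15 < s1.length then
         let t := PySem.List.slice s1 none (some 15)
         if PySem.Chars.endswith t ['.'] then PySem.List.slice t none (some (-1)) else t
       else s1
     if s2.length = 2 then s2 ++ PySem.List.slice s2 (some (-1)) none
     else if s2.length = 1 then s2 ++ s2 ++ s2 else s2) := by
  have hcond : ∀ t : List Char,
      (PySem.List.pyGet? t (-1) = some '.') ↔ (PySem.Chars.endswith t ['.'] = true) := by
    intro t
    rw [PySem.List.pyGet?_neg_one, endswith_dot_iff]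
  simp only []
  set s1 := if s = [] then ['a'] else s with hs1
  have hstep : (if 15 < s1.length then
         let t := PySem.List.slice s1 none (some 15)
         if PySem.List.pyGet? t (-1) = some '.' then PySem.List.slice t none (some (-1)) else t
       else s1) = (if 15 < s1.length then
         let t := PySem.List.slice s1 none (some 15)
         if PySem.Chars.endswith t ['.'] then PySem.List.slice t none (some (-1)) else t
       else s1) := by
    by_cases h : 15 < s1.length
    · simp only [h, if_true]
      by_cases h2 : PySem.Chars.endswith (PySem.List.slice s1 none (some 15)) ['.'] = true
      · rw [if_pos ((hcond _).2 h2), if_pos h2]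
      · rw [if_neg (fun hx => h2 ((hcond _).1 hx)), if_neg h2]
    · simp [h]
  rw [hstep]
  set u := (if 15 < s1.length then
         let t := PySem.List.slice s1 none (some 15)
         if PySem.Chars.endswith t ['.'] then PySem.List.slice t none (some (-1)) else t
       else s1) with hu
  by_cases h2 : u.length = 2
  · obtain ⟨a, b, hab⟩ := List.length_eq_two.1 h2
    rw [h2, if_pos rfl, if_pos rfl, hab]
    have : PySem.List.pyGet? [a, b] (-1) = some b := by
      rw [PySem.List.pyGet?_neg_one]; rfl
    rw [this, PySem.List.slice_from_neg_one]
    simp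
  · rw [if_neg h2, if_neg h2]

-- ===== VERDICT (by name: the statement is the Claim_ definition above) =====
theorem solution_spec : Claim_equal_solution := by
  intro new_id _
  unfold Spec_solution solution solution_alt
  have hpred : (fun c => PySem.Chars.isalnum c || (PySem.Set.ofList ['-', '_', '.']).contains c) =
      (fun c => PySem.Chars.isalnum c || "-_.".toList.contains c) := by
    funext c
    rfl
  rw [hpred]
  dsimp only
  set f := (PySem.Chars.lower new_id.toList).filter
      (fun c => PySem.Chars.isalnum c || "-_.".toList.contains c) with hf
  have hB := fold_segsW f [] []
  dsimp only at hB
  rw [hB]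
  simp only [List.nil_append]
  have hA := trimA_eq_join f
  dsimp only at hA
  rw [hA]
  have hT := tail_eq (PySem.Chars.join ['.'] (segsW [] f))
  dsimp only at hT
  exact congrArg String.ofList hT
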